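-- pv_equiv track=rewrite | github.com/JesusRamosMembrive/QML-ChessPlayerAnalyze | python/services/game_fetcher_service.py | filter_games_by_windows
-- ===== SOURCE A (Python) =====
-- def filter_games_by_windows(
--     games_to_analyze: list[dict], suspicious_windows: list[tuple[int, int]]
-- ) -> list[dict]:
--     """
--     Filter games to only those in suspicious windows.
--
--     Args:
--         games_to_analyze: List of game dicts with 'game_id' field
--         suspicious_windows: List of (start_index, end_index) tuples
--
--     Returns:
--         Filtered list containing only games in suspicious windows
--     """
--     if not suspicious_windows:
--         # No suspicious windows, analyze all games (default behavior)
--         return games_to_analyze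
--
--     # Get game IDs from suspicious windows
--     # games_to_analyze is ordered by date, so we can use indices directly
--     suspicious_game_ids = set()
--
--     for start_idx, end_idx in suspicious_windows:
--         for idx in range(start_idx, end_idx + 1):
--             if idx < len(games_to_analyze):
--                 suspicious_game_ids.add(games_to_analyze[idx].get("game_id"))
--
--     # Filter to only suspicious games
--     filtered_games = [
--         game for game in games_to_analyze if game.get("game_id") in suspicious_game_ids
--     ]
--
--     return filtered_games
-- ===== SOURCE B (Python) =====
-- def filter_games_by_windows(
--     games_to_analyze: list[dict], suspicious_windows: list[tuple[int, int]]
-- ) -> list[dict]: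
--     """Difference-array mark over positions, then one prefix-sum sweep.
--
--     Each window (start, end) is clamped to the valid position range and marked
--     in O(1); a single sweep with a running coverage counter collects the
--     game_ids at covered positions, then the list is filtered by id.
--     """
--     if not suspicious_windows:
--         return games_to_analyze
--
--     n = len(games_to_analyze)
--     diff = [0] * (n + 1)
--     for start, end in suspicious_windows:
--         lo = max(start, 0)
--         hi = min(end, n - 1)
--         if lo <= hi:
--             diff[lo] += 1
--             diff[hi + 1] -= 1
--
--     suspicious_ids = set()
--     cover = 0
--     for i, game in enumerate(games_to_analyze):
--         cover += diff[i]
--         if cover > 0: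
--             suspicious_ids.add(game.get("game_id"))
--
--     return [g for g in games_to_analyze if g.get("game_id") in suspicious_ids]
-- ===== Notes on version B (the rewrite author's own statement) =====
-- stated objective: alternative
-- what changed: Replaces A's per-index enumeration of every window span (a set insert per covered index) by a difference-array mark per window plus one prefix-sum sweep over the list; Pre_ excludes exactly the inputs where A raises IndexError (a nonempty window starting below -len(games)).
-- intended difference: On inputs where a window's negative index (which Python's range plus list indexing silently wraps to the end of the list) reaches a game_id that no directly covered position carries, A includes the wrapped-to games, while B treats window bounds as plain positions and ignores negative indices, the intended reading of (start_index, end_index) windows. — e.g. on filter_games_by_windows([[("game_id", 1)], [("game_id", 2)]], [(-1, -1)]): A returns [[("game_id", 2)]], B returns []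
import Mathlib
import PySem

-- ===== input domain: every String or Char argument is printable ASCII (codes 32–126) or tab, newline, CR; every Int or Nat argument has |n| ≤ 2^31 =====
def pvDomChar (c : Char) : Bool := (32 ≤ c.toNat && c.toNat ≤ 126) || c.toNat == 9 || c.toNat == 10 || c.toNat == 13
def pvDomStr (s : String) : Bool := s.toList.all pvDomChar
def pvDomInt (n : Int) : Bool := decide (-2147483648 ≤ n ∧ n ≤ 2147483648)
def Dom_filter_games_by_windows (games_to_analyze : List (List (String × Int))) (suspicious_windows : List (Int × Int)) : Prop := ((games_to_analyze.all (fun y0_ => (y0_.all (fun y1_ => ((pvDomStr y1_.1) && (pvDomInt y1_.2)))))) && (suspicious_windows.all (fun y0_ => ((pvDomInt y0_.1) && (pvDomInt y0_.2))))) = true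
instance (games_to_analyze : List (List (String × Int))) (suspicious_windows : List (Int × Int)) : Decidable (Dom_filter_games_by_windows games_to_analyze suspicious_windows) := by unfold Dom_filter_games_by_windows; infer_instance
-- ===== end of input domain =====

-- B replaces A's per-index enumeration of every window span by a difference-array mark per
-- window plus one prefix-sum sweep (objective: alternative); Pre_ excludes exactly A's IndexErrors,
-- and D_ states the intended difference on windows with negative start indices.

-- ===== PORT A =====
-- game.get("game_id") as both Pythons use it
def gid (g : List (String × Int)) : Option Int :=
  (PySem.Dict.mk g).get? "game_id"

def filter_games_by_windows (games_to_analyze : List (List (String × Int))) (suspicious_windows : List (Int × Int)) : List (List (String × Int)) :=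
  if suspicious_windows = [] then games_to_analyze
  else
    let ids : PySem.Set (Option Int) :=
      suspicious_windows.foldl (fun acc se =>
        (PySem.List.pyRange se.1 (se.2 + 1) 1).foldl (fun acc2 idx =>
          if idx < (games_to_analyze.length : Int) then
            match PySem.List.pyGet? games_to_analyze idx with
            | some g => PySem.Set.add acc2 (gid g)
            | none => acc2   -- IndexError in Python: excluded by Pre_
          else acc2) acc) PySem.Set.empty
    games_to_analyze.filter (fun g => PySem.Set.contains ids (gid g))

-- ===== PORT B =====
def filter_games_by_windows_alt (games_to_analyze : List (List (String × Int))) (suspicious_windows : List (Int × Int)) : List (List (String × Int)) :=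
  if suspicious_windows = [] then games_to_analyze
  else
    let n : Nat := games_to_analyze.length
    let diff : List Int :=
      suspicious_windows.foldl (fun d se =>
        let lo : Int := max se.1 0
        let hi : Int := min se.2 ((n : Int) - 1)
        if lo ≤ hi then
          let d1 := d.set lo.toNat (d.getD lo.toNat 0 + 1)
          d1.set (hi.toNat + 1) (d1.getD (hi.toNat + 1) 0 - 1)
        else d) (List.replicate (n + 1) 0)
    let swept :=
      (PySem.List.enumerate games_to_analyze).foldl
        (fun (st : Int × PySem.Set (Option Int)) pg =>
          let cover := st.1 + diff.getD pg.1.toNat 0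
          (cover, if 0 < cover then PySem.Set.add st.2 (gid pg.2) else st.2))
        (0, PySem.Set.empty)
    games_to_analyze.filter (fun g => PySem.Set.contains swept.2 (gid g))

-- ===== PRECONDITION & SPEC =====
-- Pre_ excludes exactly the inputs on which the Python A raises IndexError: a nonempty window
-- (start ≤ end) whose start lies below -len(games) makes A evaluate games[start] out of range.
def Pre_filter_games_by_windows (games_to_analyze : List (List (String × Int))) (suspicious_windows : List (Int × Int)) : Prop :=
  ∀ se ∈ suspicious_windows, ¬ (se.1 < -(games_to_analyze.length : Int) ∧ se.1 ≤ se.2)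
instance (games_to_analyze : List (List (String × Int))) (suspicious_windows : List (Int × Int)) : Decidable (Pre_filter_games_by_windows games_to_analyze suspicious_windows) := by unfold Pre_filter_games_by_windows; infer_instance

def pvWitness_filter_games_by_windows : (List (List (String × Int))) × (List (Int × Int)) :=
  ([[("game_id", 7)], [("game_id", 8)], [("game_id", 9)]], [(0, 0), (2, 5)])

-- On inputs where a window's negative index (which Python's range plus list indexing silently
-- wraps to the end of the list) reaches a game_id that no directly covered position carries, A
-- includes the wrapped-to games, while B treats window bounds as plain positions and ignores
-- negative indices, the intended reading of (start_index, end_index) windows.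
def wids (games : List (List (String × Int))) (ws : List (Int × Int)) (sh : Int) : List (Option Int) :=
  (PySem.List.enumerate games).filterMap fun pg =>
    if ws.any fun w => w.1 + sh ≤ pg.1 && pg.1 ≤ w.2 + sh then some (gid pg.2) else none

def D_filter_games_by_windows (games_to_analyze : List (List (String × Int))) (suspicious_windows : List (Int × Int)) : Prop :=
  ∃ x ∈ wids games_to_analyze suspicious_windows games_to_analyze.length, x ∉ wids games_to_analyze suspicious_windows 0
instance (games_to_analyze : List (List (String × Int))) (suspicious_windows : List (Int × Int)) : Decidable (D_filter_games_by_windows games_to_analyze suspicious_windows) := by unfold D_filter_games_by_windows; infer_instance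

def Spec_filter_games_by_windows (games_to_analyze : List (List (String × Int))) (suspicious_windows : List (Int × Int)) (out : List (List (String × Int))) : Prop := ¬ D_filter_games_by_windows games_to_analyze suspicious_windows → out = filter_games_by_windows_alt games_to_analyze suspicious_windows
instance (games_to_analyze : List (List (String × Int))) (suspicious_windows : List (Int × Int)) (out : List (List (String × Int))) : Decidable (Spec_filter_games_by_windows games_to_analyze suspicious_windows out) := by unfold Spec_filter_games_by_windows; infer_instance

def pvDiffWitness_filter_games_by_windows : (List (List (String × Int))) × (List (Int × Int)) :=
  ([[("game_id", 1)], [("game_id", 2)]], [(-1, -1)])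
def pvDiffWitnessOut_filter_games_by_windows : (List (List (String × Int))) × (List (List (String × Int))) :=
  ([[("game_id", 2)]], [])

-- ===== CLAIM (what is proved, stated in full; the proofs are below) =====
def Claim_unchanged_filter_games_by_windows : Prop := ∀ (games_to_analyze : List (List (String × Int))) (suspicious_windows : List (Int × Int)), Dom_filter_games_by_windows games_to_analyze suspicious_windows → Pre_filter_games_by_windows games_to_analyze suspicious_windows → Spec_filter_games_by_windows games_to_analyze suspicious_windows (filter_games_by_windows games_to_analyze suspicious_windows)
def Claim_changed_filter_games_by_windows : Prop := Dom_filter_games_by_windows (pvDiffWitness_filter_games_by_windows.1) (pvDiffWitness_filter_games_by_windows.2) ∧ Pre_filter_games_by_windows (pvDiffWitness_filter_games_by_windows.1) (pvDiffWitness_filter_games_by_windows.2) ∧ D_filter_games_by_windows (pvDiffWitness_filter_games_by_windows.1) (pvDiffWitness_filter_games_by_windows.2) ∧ filter_games_by_windows (pvDiffWitness_filter_games_by_windows.1) (pvDiffWitness_filter_games_by_windows.2) = pvDiffWitnessOut_filter_games_by_windows.1 ∧ filter_games_by_windows_alt (pvDiffWitness_filter_games_by_windows.1) (pvDiffWitness_filter_games_by_windows.2)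 = pvDiffWitnessOut_filter_games_by_windows.2 ∧ pvDiffWitnessOut_filter_games_by_windows.1 ≠ pvDiffWitnessOut_filter_games_by_windows.2

def Claim_exact_filter_games_by_windows : Prop := ∀ (games_to_analyze : List (List (String × Int))) (suspicious_windows : List (Int × Int)), Dom_filter_games_by_windows games_to_analyze suspicious_windows → Pre_filter_games_by_windows games_to_analyze suspicious_windows → D_filter_games_by_windows games_to_analyze suspicious_windows → filter_games_by_windows games_to_analyze suspicious_windows ≠ filter_games_by_windows_alt games_to_analyze suspicious_windows

-- ===== LEMMAS AND PROOFS =====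

lemma mem_wids (games : List (List (String × Int))) (ws : List (Int × Int)) (sh : Int) (x : Option Int) :
    x ∈ wids games ws sh ↔ ∃ p : Nat, ∃ _ : p < games.length,
      (∃ w ∈ ws, w.1 + sh ≤ (p : Int) ∧ (p : Int) ≤ w.2 + sh) ∧ gid games[p] = x := by
  simp only [wids, List.mem_filterMap]
  constructor
  · rintro ⟨pg, hpg, hf⟩
    rw [PySem.List.mem_enumerate_iff] at hpg
    obtain ⟨k, hk, rfl⟩ := hpg
    split_ifs at hf with hc
    · simp only [Option.some.injEq] at hf
      refine ⟨k, hk, ?_, hf⟩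
      simpa using hc
  · rintro ⟨p, hp, hc, hx⟩
    refine ⟨((p : Int), games[p]), ?_, ?_⟩
    · rw [PySem.List.mem_enumerate_iff]
      exact ⟨p, hp, by simp⟩
    · rw [if_pos (by simpa using hc)]
      rw [hx]

-- membership after A's inner per-index fold over one window's range
lemma memA_inner (games : List (List (String × Int))) (L : List Int) (acc : PySem.Set (Option Int)) (x : Option Int) :
    x ∈ L.foldl (fun acc2 idx =>
          if idx < (games.length : Int) then
            match PySem.List.pyGet? games idx with
            | some g => PySem.Set.add acc2 (gid g)
            | none => acc2
          else acc2) acc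
    ↔ x ∈ acc ∨ ∃ i ∈ L, i < (games.length : Int) ∧
        ∃ gm, PySem.List.pyGet? games i = some gm ∧ gid gm = x := by
  induction L generalizing acc with
  | nil => simp
  | cons i L ih =>
    simp only [List.foldl_cons, List.mem_cons]
    by_cases hlt : i < (games.length : Int)
    · cases hget : PySem.List.pyGet? games i with
      | none =>
        rw [if_pos hlt, ih]
        constructor
        · rintro (h | ⟨j, hj, h2⟩)
          · exact Or.inl h
          · exact Or.inr ⟨j, Or.inr hj, h2⟩
        · rintro (h | ⟨j, (rfl | hj), h2, gm, hg, hx⟩)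
          · exact Or.inl h
          · rw [hget] at hg; simp at hg
          · exact Or.inr ⟨j, hj, h2, gm, hg, hx⟩
      | some gm =>
        rw [if_pos hlt, ih]
        simp only [PySem.Set.mem_add]
        constructor
        · rintro (⟨h | h⟩ | ⟨j, hj, h⟩)
          · exact Or.inl h
          · exact Or.inr ⟨i, Or.inl rfl, hlt, gm, hget, h.symm⟩
          · exact Or.inr ⟨j, Or.inr hj, h⟩
        · rintro (h | ⟨j, (rfl | hj), h2, gm', hg, hx⟩)
          · exact Or.inl (Or.inl h)
          · rw [hget] at hg
            obtain rfl : gm = gm' := Option.some.inj hg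
            exact Or.inl (Or.inr hx.symm)
          · exact Or.inr ⟨j, hj, h2, gm', hg, hx⟩
    · rw [if_neg hlt, ih]
      constructor
      · rintro (h | ⟨j, hj, h2⟩)
        · exact Or.inl h
        · exact Or.inr ⟨j, Or.inr hj, h2⟩
      · rintro (h | ⟨j, (rfl | hj), h2, rest⟩)
        · exact Or.inl h
        · exact absurd h2 hlt
        · exact Or.inr ⟨j, hj, h2, rest⟩

-- membership after A's outer fold over the windows
lemma memA_outer (games : List (List (String × Int))) (ws : List (Int × Int)) (acc : PySem.Set (Option Int)) (x : Option Int) :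
    x ∈ ws.foldl (fun acc se =>
          (PySem.List.pyRange se.1 (se.2 + 1) 1).foldl (fun acc2 idx =>
            if idx < (games.length : Int) then
              match PySem.List.pyGet? games idx with
              | some g => PySem.Set.add acc2 (gid g)
              | none => acc2
            else acc2) acc) acc
    ↔ x ∈ acc ∨ ∃ se ∈ ws, ∃ i, se.1 ≤ i ∧ i ≤ se.2 ∧ i < (games.length : Int) ∧
        ∃ gm, PySem.List.pyGet? games i = some gm ∧ gid gm = x := by
  induction ws generalizing acc with
  | nil => simp
  | cons se ws ih =>
    simp only [List.foldl_cons, List.mem_cons, ih, memA_inner, PySem.List.mem_pyRange_one]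
    constructor
    · rintro (⟨h | ⟨i, ⟨h1, h2⟩, h3, h4⟩⟩ | ⟨se', hse', h⟩)
      · exact Or.inl h
      · exact Or.inr ⟨se, Or.inl rfl, i, h1, by omega, h3, h4⟩
      · exact Or.inr ⟨se', Or.inr hse', h⟩
    · rintro (h | ⟨se', (rfl | hse'), i, h1, h2, h3, h4⟩)
      · exact Or.inl (Or.inl h)
      · exact Or.inl (Or.inr ⟨i, ⟨h1, by omega⟩, h3, h4⟩)
      · exact Or.inr ⟨se', hse', i, h1, h2, h3, h4⟩

-- prefix sum of a difference array, starting at index s, over m entries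
def psum (d : List Int) (s m : Nat) : Int :=
  match m with
  | 0 => 0
  | m + 1 => d.getD s 0 + psum d (s + 1) m

lemma psum_replicate (n s m : Nat) : psum (List.replicate n (0 : Int)) s m = 0 := by
  induction m generalizing s with
  | zero => rfl
  | succ m ih =>
    simp only [psum]
    rw [ih]
    have h : (List.replicate n (0 : Int)).getD s 0 = 0 := by
      simp [List.getD, List.getElem?_replicate]
      split <;> simp
    omega

lemma psum_set (d : List Int) (i : Nat) (v : Int) (s m : Nat) :
    psum (d.set i v) s m = psum d s m + (if s ≤ i ∧ i < s + m ∧ i < d.length then v - d.getD i 0 else 0) := by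
  induction m generalizing s with
  | zero =>
    have h : ¬ (s ≤ i ∧ i < s + 0 ∧ i < d.length) := by omega
    simp only [psum, if_neg h]
    ring
  | succ m ih =>
    by_cases hlen : i < d.length
    · simp only [psum]
      rw [ih]
      have hget : (d.set i v).getD s 0 = if i = s then v else d.getD s 0 := by
        simp only [List.getD, List.getElem?_set]
        by_cases h : i = s
        · subst h; simp [hlen]
        · simp [h]
      rw [hget]
      by_cases his : i = s
      · subst his
        rw [if_pos rfl, if_neg (by omega), if_pos (by omega)]
        ring
      · rw [if_neg his]
        by_cases hc : s + 1 ≤ i ∧ i < s + 1 + m ∧ i < d.length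
        · rw [if_pos hc, if_pos (by omega)]; ring
        · rw [if_neg hc, if_neg (by omega)]; ring
    · rw [List.set_eq_of_length_le (by omega), if_neg (by omega)]
      ring

-- the per-window step of B's difference-array fold
def bstep (n : Nat) (d : List Int) (se : Int × Int) : List Int :=
  if max se.1 0 ≤ min se.2 ((n : Int) - 1) then
    (d.set (max se.1 0).toNat (d.getD (max se.1 0).toNat 0 + 1)).set
      ((min se.2 ((n : Int) - 1)).toNat + 1)
      ((d.set (max se.1 0).toNat (d.getD (max se.1 0).toNat 0 + 1)).getD
        ((min se.2 ((n : Int) - 1)).toNat + 1) 0 - 1)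
  else d

lemma bstep_length (n : Nat) (d : List Int) (se : Int × Int) : (bstep n d se).length = d.length := by
  unfold bstep
  split_ifs <;> simp

lemma psum_bstep (n k : Nat) (hk : k < n) (se : Int × Int) (d : List Int) (hd : d.length = n + 1) :
    psum (bstep n d se) 0 (k + 1)
      = psum d 0 (k + 1) + (if se.1 ≤ (k : Int) ∧ (k : Int) ≤ se.2 then 1 else 0) := by
  unfold bstep
  have hL0 : (0 : Int) ≤ max se.1 0 := le_max_right _ _
  have hLs : se.1 ≤ max se.1 0 := le_max_left _ _
  have hLk : ∀ j : Int, 0 ≤ j → (max se.1 0 ≤ j ↔ se.1 ≤ j) := by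
    intro j hj; constructor
    · intro h; exact le_trans hLs h
    · intro h; exact max_le h hj
  have hHn : min se.2 ((n : Int) - 1) ≤ (n : Int) - 1 := min_le_right _ _
  have hHs : min se.2 ((n : Int) - 1) ≤ se.2 := min_le_left _ _
  have hHk : ∀ j : Int, j ≤ (n : Int) - 1 → (j ≤ min se.2 ((n : Int) - 1) ↔ j ≤ se.2) := by
    intro j hj; constructor
    · intro h; exact le_trans h hHs
    · intro h; exact le_min h hj
  by_cases hcov : max se.1 0 ≤ min se.2 ((n : Int) - 1)
  · rw [if_pos hcov]
    set L : Int := max se.1 0 with hLdef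
    set H : Int := min se.2 ((n : Int) - 1) with hHdef
    have e1 : (0 ≤ L.toNat ∧ L.toNat < 0 + (k + 1) ∧ L.toNat < d.length) ↔ se.1 ≤ (k : Int) := by
      rw [← hLk (k : Int) (by omega)]
      constructor
      · intro h; omega
      · intro h; omega
    have e2 : (0 ≤ H.toNat + 1 ∧ H.toNat + 1 < 0 + (k + 1) ∧ H.toNat + 1 < d.length) ↔ ¬ ((k : Int) ≤ se.2) := by
      rw [← hHk (k : Int) (by omega)]
      constructor
      · intro h; omega
      · intro h; omega
    simp only [psum_set, List.length_set]
    by_cases c2 : (k : Int) ≤ se.2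
    · have hH : ¬ (0 ≤ H.toNat + 1 ∧ H.toNat + 1 < 0 + (k + 1) ∧ H.toNat + 1 < d.length) :=
        fun h => (e2.mp h) c2
      rw [if_neg hH]
      by_cases c1 : se.1 ≤ (k : Int)
      · rw [if_pos (e1.mpr c1), if_pos ⟨c1, c2⟩]; ring
      · rw [if_neg (fun h => c1 (e1.mp h)), if_neg (fun h => c1 h.1)]; ring
    · have hH : (0 ≤ H.toNat + 1 ∧ H.toNat + 1 < 0 + (k + 1) ∧ H.toNat + 1 < d.length) := e2.mpr c2
      have hc1 : se.1 ≤ (k : Int) := by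
        have hLH : L ≤ se.2 := le_trans hcov hHs
        omega
      rw [if_pos hH, if_pos (e1.mpr hc1), if_neg (fun h => c2 h.2)]
      ring
  · rw [if_neg hcov, if_neg ?_]
    · omega
    · intro h
      exact hcov (le_min (max_le (le_trans h.1 (by omega)) (by omega)) (max_le (by omega) (by omega)))

lemma psum_foldl (n k : Nat) (hk : k < n) (ws : List (Int × Int)) :
    ∀ d : List Int, d.length = n + 1 →
    psum (ws.foldl (bstep n) d) 0 (k + 1)
      = psum d 0 (k + 1) + (ws.countP (fun se => decide (se.1 ≤ (k : Int) ∧ (k : Int) ≤ se.2)) : Int) := by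
  induction ws with
  | nil => intro d _; simp
  | cons se ws ih =>
    intro d hd
    rw [List.foldl_cons, ih _ (by rw [bstep_length]; exact hd), psum_bstep n k hk se d hd,
      List.countP_cons]
    by_cases h : se.1 ≤ (k : Int) ∧ (k : Int) ≤ se.2
    · rw [if_pos h, if_pos (by simpa using h)]
      push_cast
      ring
    · rw [if_neg h, if_neg (by simpa using h)]
      push_cast
      ring

-- membership after B's sweep over the enumerated list
lemma memB_sweep (d : List Int) (gs : List (List (String × Int))) (s : Nat) (c : Int)
    (acc : PySem.Set (Option Int)) (x : Option Int) :
    x ∈ ((PySem.List.enumerate gs (s : Int)).foldl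
          (fun (st : Int × PySem.Set (Option Int)) pg =>
            (st.1 + d.getD pg.1.toNat 0,
              if 0 < st.1 + d.getD pg.1.toNat 0 then
                PySem.Set.add st.2 (gid pg.2)
              else st.2))
          (c, acc)).2
    ↔ x ∈ acc ∨ ∃ k : Nat, ∃ gm, gs[k]? = some gm ∧ 0 < c + psum d s (k + 1) ∧
        gid gm = x := by
  induction gs generalizing s c acc with
  | nil => simp [PySem.List.enumerate_nil]
  | cons g gs ih =>
    rw [PySem.List.enumerate_cons, List.foldl_cons]
    have hcast : (s : Int) + 1 = ((s + 1 : Nat) : Int) := by push_cast; ring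
    simp only [hcast]
    have htn : ((s : Int)).toNat = s := by omega
    simp only [htn]
    rw [ih]
    by_cases hc : 0 < c + d.getD s 0
    · simp only [if_pos hc, PySem.Set.mem_add]
      constructor
      · rintro ((h | h) | ⟨k, gm, h1, h2, h3⟩)
        · exact Or.inl h
        · refine Or.inr ⟨0, g, by simp, ?_, h.symm⟩
          simp only [psum]
          omega
        · refine Or.inr ⟨k + 1, gm, by simpa using h1, ?_, h3⟩
          simp only [psum] at h2 ⊢
          omega
      · rintro (h | ⟨k, gm, h1, h2, h3⟩)
        · exact Or.inl (Or.inl h)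
        · cases k with
          | zero =>
            simp at h1; subst h1
            exact Or.inl (Or.inr h3.symm)
          | succ k =>
            refine Or.inr ⟨k, gm, by simpa using h1, ?_, h3⟩
            simp only [psum] at h2 ⊢
            omega
    · simp only [if_neg hc]
      constructor
      · rintro (h | ⟨k, gm, h1, h2, h3⟩)
        · exact Or.inl h
        · refine Or.inr ⟨k + 1, gm, by simpa using h1, ?_, h3⟩
          simp only [psum] at h2 ⊢
          omega
      · rintro (h | ⟨k, gm, h1, h2, h3⟩)
        · exact Or.inl h
        · cases k with
          | zero =>
            simp only [psum] at h2
            exact absurd (by omega : 0 < c + d.getD s 0) hc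
          | succ k =>
            refine Or.inr ⟨k, gm, by simpa using h1, ?_, h3⟩
            simp only [psum] at h2 ⊢
            omega

-- pyGet? on a negative in-range index
lemma pyGet?_neg_add (xs : List (List (String × Int))) (i : Int) (hneg : i < 0) (hge : -(xs.length : Int) ≤ i) :
    PySem.List.pyGet? xs i = xs[(i + xs.length).toNat]? := by
  have hk1 : 0 < (-i).toNat := by omega
  have hk2 : (-i).toNat ≤ xs.length := by omega
  have := PySem.List.pyGet?_neg_natCast xs (k := (-i).toNat) hk1 hk2
  have hi : -(((-i).toNat : Nat) : Int) = i := by omega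
  rw [hi] at this
  rw [this]
  congr 1
  omega

lemma contains_congr {V : Type} [BEq V] [LawfulBEq V] (s t : PySem.Set V) (x : V)
    (h : x ∈ s ↔ x ∈ t) : PySem.Set.contains s x = PySem.Set.contains t x := by
  rw [Bool.eq_iff_iff]
  simp only [PySem.Set.contains_iff]
  exact h

-- the bridge: outside D_, A's collected ids and B's covered positions have the same members
lemma ids_iff (games : List (List (String × Int))) (ws : List (Int × Int))
    (hD : ¬ D_filter_games_by_windows games ws) (x : Option Int) :
    (∃ se ∈ ws, ∃ i, se.1 ≤ i ∧ i ≤ se.2 ∧ i < (games.length : Int) ∧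
        ∃ gm, PySem.List.pyGet? games i = some gm ∧ gid gm = x)
    ↔ ∃ k : Nat, ∃ gm, games[k]? = some gm ∧ (∃ se ∈ ws, se.1 ≤ (k : Int) ∧ (k : Int) ≤ se.2) ∧
        gid gm = x := by
  unfold D_filter_games_by_windows at hD
  constructor
  · rintro ⟨se, hse, i, h1, h2, h3, gm, hget, hx⟩
    have hrange : -(games.length : Int) ≤ i := by
      by_contra hlt
      rw [(PySem.List.pyGet?_eq_none_iff games i).mpr (by unfold PySem.Raise.InRange; omega)] at hget
      simp at hget
    by_cases hpos : 0 ≤ i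
    · refine ⟨i.toNat, gm, ?_, ⟨se, hse, by omega, by omega⟩, hx⟩
      have hcast : i = ((i.toNat : Nat) : Int) := by omega
      rw [hcast, PySem.List.pyGet?_natCast] at hget
      exact hget
    · -- negative index: outside D_, the wrapped-to id also occurs at a covered position
      set p : Nat := (i + games.length).toNat with hp
      have hplen : p < games.length := by omega
      have hgm : games[p]? = some gm := by
        rw [pyGet?_neg_add games i (by omega) hrange] at hget
        exact hget
      have hgmp : games[p] = gm := by
        rw [List.getElem?_eq_getElem hplen] at hgm
        exact Option.some.inj hgm
      have hwrap : gid games[p] ∈ wids games ws games.length := by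
        rw [mem_wids]
        exact ⟨p, hplen, ⟨se, hse, by omega, by omega⟩, rfl⟩
      have hx0 : gid games[p] ∈ wids games ws 0 := by
        by_contra hn
        exact hD ⟨gid games[p], hwrap, hn⟩
      rw [mem_wids] at hx0
      obtain ⟨q, hq, ⟨se', hse', h1', h2'⟩, hqe⟩ := hx0
      refine ⟨q, games[q], List.getElem?_eq_getElem hq, ⟨se', hse', by omega, by omega⟩, ?_⟩
      rw [hqe, hgmp, hx]
  · rintro ⟨k, gm, hk, ⟨se, hse, h1, h2⟩, hx⟩
    have hklen : k < games.length := by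
      by_contra h
      simp [List.getElem?_eq_none (by omega : games.length ≤ k)] at hk
    refine ⟨se, hse, (k : Int), h1, h2, by omega, gm, ?_, hx⟩
    rw [PySem.List.pyGet?_natCast]
    exact hk

-- ===== VERDICT (by name: the statements are the Claim_ definitions above) =====
theorem filter_games_by_windows_spec : Claim_unchanged_filter_games_by_windows := by
  intro games ws _ _ hD
  unfold filter_games_by_windows filter_games_by_windows_alt
  by_cases hws : ws = []
  · simp [hws]
  · simp only [hws, if_neg, not_false_eq_true]
    apply List.filter_congr
    intro g _
    apply contains_congr
    rw [show (PySem.List.enumerate games : List (Int × List (String × Int)))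
          = PySem.List.enumerate games ((0 : Nat) : Int) by norm_num,
      memA_outer games ws PySem.Set.empty,
      memB_sweep _ games 0 0 PySem.Set.empty]
    have hB : ∀ k : Nat, k < games.length →
        (0 : Int) + psum (ws.foldl (bstep games.length) (List.replicate (games.length + 1) 0)) 0 (k + 1)
          = (ws.countP (fun se => decide (se.1 ≤ (k : Int) ∧ (k : Int) ≤ se.2)) : Int) := by
      intro k hk
      rw [psum_foldl games.length k hk ws _ (by simp), psum_replicate]
      omega
    simp only [PySem.Set.empty, List.not_mem_nil, false_or]
    constructor
    · intro h
      rw [ids_iff games ws hD] at h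
      obtain ⟨k, gm, hk, ⟨se, hse, h1, h2⟩, hx⟩ := h
      have hklen : k < games.length := by
        by_contra hcon
        simp [List.getElem?_eq_none (by omega : games.length ≤ k)] at hk
      refine ⟨k, gm, hk, ?_, hx⟩
      rw [show (ws.foldl (fun d se =>
            if max se.1 0 ≤ min se.2 ((games.length : Int) - 1) then
              (d.set (max se.1 0).toNat (d.getD (max se.1 0).toNat 0 + 1)).set
                ((min se.2 ((games.length : Int) - 1)).toNat + 1)
                (((d.set (max se.1 0).toNat (d.getD (max se.1 0).toNat 0 + 1)).getD
                  ((min se.2 ((games.length : Int) - 1)).toNat + 1) 0) - 1)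
            else d) (List.replicate (games.length + 1) 0))
          = ws.foldl (bstep games.length) (List.replicate (games.length + 1) 0) from rfl]
      rw [hB k hklen]
      have : 0 < ws.countP (fun se => decide (se.1 ≤ (k : Int) ∧ (k : Int) ≤ se.2)) := by
        rw [List.countP_pos_iff]
        exact ⟨se, hse, by simp [h1, h2]⟩
      omega
    · rintro ⟨k, gm, hk, hpos, hx⟩
      have hklen : k < games.length := by
        by_contra hcon
        simp [List.getElem?_eq_none (by omega : games.length ≤ k)] at hk
      rw [show (ws.foldl (fun d se =>
            if max se.1 0 ≤ min se.2 ((games.length : Int) - 1) then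
              (d.set (max se.1 0).toNat (d.getD (max se.1 0).toNat 0 + 1)).set
                ((min se.2 ((games.length : Int) - 1)).toNat + 1)
                (((d.set (max se.1 0).toNat (d.getD (max se.1 0).toNat 0 + 1)).getD
                  ((min se.2 ((games.length : Int) - 1)).toNat + 1) 0) - 1)
            else d) (List.replicate (games.length + 1) 0))
          = ws.foldl (bstep games.length) (List.replicate (games.length + 1) 0) from rfl] at hpos
      rw [hB k hklen] at hpos
      have hcnt : 0 < ws.countP (fun se => decide (se.1 ≤ (k : Int) ∧ (k : Int) ≤ se.2)) := by omega
      rw [List.countP_pos_iff] at hcnt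
      obtain ⟨se, hse, hsek⟩ := hcnt
      simp at hsek
      rw [ids_iff games ws hD]
      exact ⟨k, gm, hk, ⟨se, hse, hsek.1, hsek.2⟩, hx⟩

theorem filter_games_by_windows_changed : Claim_changed_filter_games_by_windows := by
  unfold Claim_changed_filter_games_by_windows; decide

theorem filter_games_by_windows_tight : Claim_exact_filter_games_by_windows := by
  intro games ws _ _ hD heq
  obtain ⟨x, hxw, hx0⟩ := hD
  rw [mem_wids] at hxw
  obtain ⟨p, hplen, ⟨se, hse, hw1, hw2⟩, hxg⟩ := hxw
  have hws : ¬ ws = [] := by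
    intro h
    subst h
    simp at hse
  have hA : games[p] ∈ filter_games_by_windows games ws := by
    unfold filter_games_by_windows
    simp only [hws, if_neg, not_false_eq_true]
    rw [List.mem_filter]
    refine ⟨List.getElem_mem hplen, ?_⟩
    rw [PySem.Set.contains_iff]
    rw [memA_outer games ws PySem.Set.empty]
    refine Or.inr ⟨se, hse, (p : Int) - games.length, by omega, by omega, by omega, games[p], ?_, rfl⟩
    rw [pyGet?_neg_add games _ (by omega) (by omega)]
    have hpp : ((p : Int) - games.length + games.length).toNat = p := by omega
    rw [hpp]
    exact List.getElem?_eq_getElem hplen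
  have hB : games[p] ∉ filter_games_by_windows_alt games ws := by
    intro hmem
    unfold filter_games_by_windows_alt at hmem
    simp only [hws, if_neg, not_false_eq_true] at hmem
    rw [List.mem_filter] at hmem
    have hx := hmem.2
    rw [PySem.Set.contains_iff] at hx
    rw [show (PySem.List.enumerate games : List (Int × List (String × Int)))
          = PySem.List.enumerate games ((0 : Nat) : Int) by norm_num] at hx
    rw [memB_sweep _ games 0 0 PySem.Set.empty] at hx
    simp only [PySem.Set.empty, List.not_mem_nil, false_or] at hx
    obtain ⟨k, gm, hk, hpos, hgid⟩ := hx
    have hklen : k < games.length := by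
      by_contra hcon
      simp [List.getElem?_eq_none (by omega : games.length ≤ k)] at hk
    rw [show (ws.foldl (fun d se =>
            if max se.1 0 ≤ min se.2 ((games.length : Int) - 1) then
              (d.set (max se.1 0).toNat (d.getD (max se.1 0).toNat 0 + 1)).set
                ((min se.2 ((games.length : Int) - 1)).toNat + 1)
                (((d.set (max se.1 0).toNat (d.getD (max se.1 0).toNat 0 + 1)).getD
                  ((min se.2 ((games.length : Int) - 1)).toNat + 1) 0) - 1)
            else d) (List.replicate (games.length + 1) 0))
          = ws.foldl (bstep games.length) (List.replicate (games.length + 1) 0) from rfl] at hpos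
    rw [psum_foldl games.length k hklen ws _ (by simp), psum_replicate] at hpos
    have hcnt : 0 < ws.countP (fun se => decide (se.1 ≤ (k : Int) ∧ (k : Int) ≤ se.2)) := by omega
    rw [List.countP_pos_iff] at hcnt
    obtain ⟨se', hse', hsek⟩ := hcnt
    simp at hsek
    have hkm : games[k] = gm := by
      rw [List.getElem?_eq_getElem hklen] at hk
      exact Option.some.inj hk
    apply hx0
    rw [mem_wids]
    refine ⟨k, hklen, ⟨se', hse', by omega, by omega⟩, ?_⟩
    rw [hkm, hgid, hxg]
  exact hB (heq ▸ hA)
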